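-- pv_equiv track=rewrite | github.com/gaushwravetu/Coding-Problems | code chef/the tom and jerry game(june long challenge).py | StrengthChecker
-- ===== SOURCE A (Python) =====
-- def StrengthChecker(tm):
--     ans = 0
--     if tm==1 or tm==2:
--         return ans
--     elif tm%2!=0:
--         ans = ((tm-3)//2)+1
--         return ans
--     else:
--         tm = tm//2
--         return StrengthChecker(tm)
-- ===== SOURCE B (Python) =====
-- def StrengthChecker(tm):
--     while tm % 2 == 0:
--         tm //= 2
--     return (tm - 1) // 2
-- ===== Notes on version B (the rewrite author's own statement) =====
-- stated objective: simpler
-- what changed: Replaces the self-recursion and three-way case split by a flat loop stripping factors of two followed by the single closed form (tm-1)//2, which covers the base and odd cases uniformly.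
import Mathlib
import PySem

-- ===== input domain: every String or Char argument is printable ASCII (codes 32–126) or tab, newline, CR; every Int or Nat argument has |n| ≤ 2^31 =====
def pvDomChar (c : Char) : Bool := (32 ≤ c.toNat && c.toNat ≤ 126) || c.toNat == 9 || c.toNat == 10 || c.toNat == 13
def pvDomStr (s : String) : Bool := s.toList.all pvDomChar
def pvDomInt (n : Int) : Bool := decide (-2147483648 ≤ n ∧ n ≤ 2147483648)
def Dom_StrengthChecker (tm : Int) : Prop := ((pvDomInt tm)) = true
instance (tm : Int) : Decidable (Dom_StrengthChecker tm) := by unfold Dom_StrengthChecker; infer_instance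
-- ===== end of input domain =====

-- B replaces A's self-recursion by a flat strip-factors-of-two loop plus the single
-- closed form (tm-1)//2 (objective: simpler).

-- termination helper for both ports: halving a nonzero even integer shrinks |tm|
theorem pvHalfNatAbsLt (tm : Int) (h0 : tm ≠ 0) (he : PySem.Int.mod tm 2 = 0) :
    (PySem.Int.floordiv tm 2).natAbs < tm.natAbs := by
  rw [PySem.Int.floordiv_eq_ediv_of_pos (by norm_num)]
  rw [PySem.Int.mod_eq_emod_of_pos (by norm_num)] at he
  omega

-- ===== PORT A =====
def StrengthChecker (tm : Int) : Int :=
  if tm = 1 ∨ tm = 2 then 0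
  else if hodd : PySem.Int.mod tm 2 ≠ 0 then PySem.Int.floordiv (tm - 3) 2 + 1
  else if h0 : tm = 0 then 0   -- totality guard only: Python diverges (RecursionError) at 0, excluded by Pre_
  else StrengthChecker (PySem.Int.floordiv tm 2)
termination_by tm.natAbs
decreasing_by exact pvHalfNatAbsLt tm h0 (by simpa using hodd)

-- ===== PORT B =====
-- the while-loop: strip factors of two
def pvStrip2 (tm : Int) : Int :=
  if h0 : tm = 0 then 0   -- totality guard only: the Python loop diverges at 0, excluded by Pre_
  else if he : PySem.Int.mod tm 2 = 0 then pvStrip2 (PySem.Int.floordiv tm 2)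
  else tm
termination_by tm.natAbs
decreasing_by exact pvHalfNatAbsLt tm h0 he

def StrengthChecker_alt (tm : Int) : Int :=
  PySem.Int.floordiv (pvStrip2 tm - 1) 2

-- ===== PRECONDITION & SPEC =====
-- Pre_ excludes only tm = 0, where Python A diverges (RecursionError) and B's loop spins forever.
def Pre_StrengthChecker (tm : Int) : Prop := tm ≠ 0
instance (tm : Int) : Decidable (Pre_StrengthChecker tm) := by unfold Pre_StrengthChecker; infer_instance
def pvWitness_StrengthChecker : Int := (12)

def Spec_StrengthChecker (tm : Int) (out : Int) : Prop := out = StrengthChecker_alt tm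
instance (tm : Int) (out : Int) : Decidable (Spec_StrengthChecker tm out) := by unfold Spec_StrengthChecker; infer_instance

-- ===== CLAIM (what is proved, stated in full; the proofs are below) =====
def Claim_equal_StrengthChecker : Prop := ∀ (tm : Int), Dom_StrengthChecker tm → Pre_StrengthChecker tm → Spec_StrengthChecker tm (StrengthChecker tm)

-- ===== LEMMAS AND PROOFS =====

-- on odd tm the closed form matches A's odd branch
theorem pvOddForm (tm : Int) (hodd : PySem.Int.mod tm 2 ≠ 0) :
    PySem.Int.floordiv (tm - 3) 2 + 1 = PySem.Int.floordiv (tm - 1) 2 := by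
  rw [PySem.Int.floordiv_eq_ediv_of_pos (by norm_num),
      PySem.Int.floordiv_eq_ediv_of_pos (by norm_num)]
  rw [PySem.Int.mod_eq_emod_of_pos (by norm_num)] at hodd
  omega

theorem pvKey : ∀ (n : Nat) (tm : Int), tm.natAbs ≤ n → tm ≠ 0 →
    StrengthChecker tm = StrengthChecker_alt tm := by
  intro n
  induction n with
  | zero => intro tm hle h0; omega
  | succ n ih =>
    intro tm hle h0
    rw [StrengthChecker]
    by_cases hb : tm = 1 ∨ tm = 2
    · rw [if_pos hb]
      rcases hb with rfl | rfl <;>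
        simp [StrengthChecker_alt, pvStrip2, PySem.Int.mod, PySem.Int.floordiv]
    · rw [if_neg hb]
      by_cases heven : PySem.Int.mod tm 2 = 0
      · rw [dif_neg (by simpa using heven), dif_neg h0]
        have hlt := pvHalfNatAbsLt tm h0 heven
        have hhalf0 : PySem.Int.floordiv tm 2 ≠ 0 := by
          rw [PySem.Int.floordiv_eq_ediv_of_pos (by norm_num)]
          rw [PySem.Int.mod_eq_emod_of_pos (by norm_num)] at heven
          omega
        rw [ih (PySem.Int.floordiv tm 2) (by omega) hhalf0]
        rw [StrengthChecker_alt, StrengthChecker_alt]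
        conv_rhs => rw [pvStrip2]
        rw [dif_neg h0, dif_pos heven]
      · rw [dif_pos (by simpa using heven)]
        rw [StrengthChecker_alt, pvStrip2, dif_neg h0, dif_neg heven]
        exact pvOddForm tm heven

-- ===== VERDICT (by name: the statement is the Claim_ definition above) =====
theorem StrengthChecker_spec : Claim_equal_StrengthChecker := by
  intro tm _ hpre
  exact pvKey tm.natAbs tm le_rfl hpre
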